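-- pv_equiv track=rewrite | github.com/SouthGiri/Algorithm_Practice | 백준/Bronze/9349. Fegla and the Bed Bugs/Fegla and the Bed Bugs.py | solve
-- ===== SOURCE A (Python) =====
-- def solve(n, k):
--     def place(d):
--         cnt = 1
--         last_pos = 0
--         for i in range(1, k):
--             nxt = last_pos + d
--             if nxt >= n:
--                 return False
--             last_pos = nxt
--             cnt += 1
--         return cnt >= k
--
--     low, high = 1, n
--     best = 0
--     while low <= high:
--         mid = (low + high) // 2
--         if place(mid):
--             best = mid
--             low = mid+1
--         else:
--             high = mid-1
--     return best
-- ===== SOURCE B (Python) =====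
-- def solve(n, k):
--     # Closed form: with k points placed greedily from 0 at spacing d,
--     # d fits iff (k-1)*d <= n-1, so the best spacing is (n-1)//(k-1).
--     if n < 1:
--         return 0
--     if k <= 1:
--         return n
--     return (n - 1) // (k - 1)
-- ===== Notes on version B (the rewrite author's own statement) =====
-- stated objective: faster
-- what changed: Replaced the binary search over spacings (each probe simulating the k-1 placements) with the closed-form answer (n-1)//(k-1), with n and 0 as the k<=1 / n<1 cases.
import Mathlib
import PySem

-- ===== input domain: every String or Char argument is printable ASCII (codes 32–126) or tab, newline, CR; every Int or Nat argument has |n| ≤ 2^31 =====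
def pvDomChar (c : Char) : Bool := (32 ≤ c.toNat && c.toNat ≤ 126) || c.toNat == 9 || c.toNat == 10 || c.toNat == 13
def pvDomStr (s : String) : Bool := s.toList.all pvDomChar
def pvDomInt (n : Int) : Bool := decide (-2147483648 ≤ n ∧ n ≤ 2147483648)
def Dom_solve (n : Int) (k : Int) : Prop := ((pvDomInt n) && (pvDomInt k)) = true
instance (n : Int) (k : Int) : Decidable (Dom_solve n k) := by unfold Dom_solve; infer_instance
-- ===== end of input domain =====

-- B replaces A's binary search (each probe simulating k-1 placements) with the
-- closed form (n-1)//(k-1); objective: faster (asymptotic, O(1) vs O(k log n)).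


-- ===== PORT A =====
-- inner 'for i in range(1, k)' loop of place(d): i the range counter, state (cnt, last_pos)
def placeLoop (n k d : Int) (i cnt last_pos : Int) : Bool :=
  if i < k then
    let nxt := last_pos + d
    if nxt ≥ n then false
    else placeLoop n k d (i + 1) (cnt + 1) nxt
  else decide (cnt ≥ k)
termination_by (k - i).toNat
decreasing_by omega

def place (n k d : Int) : Bool :=
  placeLoop n k d 1 1 0

-- 'while low <= high' loop; terminates since the interval shrinks around mid
def bsLoop (n k low high best : Int) : Int :=
  if h : low ≤ high then
    let mid := PySem.Int.floordiv (low + high) 2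
    if place n k mid then bsLoop n k (mid + 1) high mid
    else bsLoop n k low (mid - 1) best
  else best
termination_by (high + 1 - low).toNat
decreasing_by
  · have := PySem.Int.floordiv_two_mid_bounds h; omega
  · have := PySem.Int.floordiv_two_mid_bounds h; omega

def solve (n : Int) (k : Int) : Int := bsLoop n k 1 n 0

-- ===== PORT B =====
def solve_alt (n : Int) (k : Int) : Int :=
  if n < 1 then 0
  else if k ≤ 1 then n
  else PySem.Int.floordiv (n - 1) (k - 1)

-- ===== PRECONDITION & SPEC =====
def Spec_solve (n : Int) (k : Int) (out : Int) : Prop := out = solve_alt n k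
instance (n : Int) (k : Int) (out : Int) : Decidable (Spec_solve n k out) := by unfold Spec_solve; infer_instance

-- ===== CLAIM (what is proved, stated in full; the proofs are below) =====
def Claim_equal_solve : Prop := ∀ (n : Int) (k : Int), Dom_solve n k → Spec_solve n k (solve n k)

-- ===== LEMMAS AND PROOFS =====

-- the placement loop succeeds iff the last bug sits at (k-1)*d ≤ n-1
lemma placeLoop_eq (n k d : Int) (hd : 1 ≤ d) (i : Int) (hi1 : 1 ≤ i) (hik : i ≤ k)
    (hprev : (i - 1) * d ≤ n - 1) :
    placeLoop n k d i i ((i - 1) * d) = decide ((k - 1) * d ≤ n - 1) := by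
  rw [placeLoop]
  by_cases hcase : i < k
  · rw [if_pos hcase]
    show (if (i-1)*d + d ≥ n then false
          else placeLoop n k d (i+1) (i+1) ((i-1)*d + d))
        = decide ((k - 1) * d ≤ n - 1)
    have hstep : (i - 1) * d + d = i * d := by ring
    by_cases hfail : (i-1)*d + d ≥ n
    · have hmono : i * d ≤ (k - 1) * d :=
        mul_le_mul_of_nonneg_right (by omega) (by omega)
      simp only [hfail, if_pos]
      symm; rw [decide_eq_false_iff_not]; omega
    · simp only [hfail, if_neg, not_false_eq_true]
      rw [hstep]
      have harg : (i + 1 - 1) * d ≤ n - 1 := by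
        have h2 : (i + 1 - 1) * d = i * d := by ring
        omega
      have := placeLoop_eq n k d hd (i + 1) (by omega) (by omega) harg
      simpa using this
  · rw [if_neg hcase]
    have hik' : i = k := by omega
    subst hik'
    simp only [ge_iff_le, le_refl, decide_true]
    symm; rw [decide_eq_true_iff]; omega
termination_by (k - i).toNat
decreasing_by omega

lemma place_eq (n k d : Int) (_hn : 1 ≤ n) (hd : 1 ≤ d) (hdn : d ≤ n) :
    place n k d = decide (d ≤ (if k ≤ 1 then n else PySem.Int.floordiv (n - 1) (k - 1))) := by
  unfold place
  by_cases hk : k ≤ 1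
  · rw [placeLoop]
    rw [if_neg (by omega : ¬ (1:Int) < k)]
    simp only [hk, if_pos]
    simp [hdn]
  · have h0 : (1 - 1 : Int) * d = 0 := by ring
    have := placeLoop_eq n k d hd 1 le_rfl (by omega) (by omega)
    rw [h0] at this
    rw [this]
    simp only [hk, if_neg, not_false_eq_true]
    have hpos : (0:Int) < k - 1 := by omega
    rw [decide_eq_decide]
    rw [PySem.Int.le_floordiv_iff_mul_le hpos, mul_comm]

-- binary search over a threshold predicate returns the threshold clamped to the interval
lemma bsLoop_eq (n k B low high best : Int)
    (hP : ∀ d, low ≤ d → d ≤ high → place n k d = decide (d ≤ B)) :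
    bsLoop n k low high best
      = if high < low then best else if B < low then best else min high B := by
  by_cases h : low ≤ high
  · have hmid := PySem.Int.floordiv_two_mid_bounds h
    rw [bsLoop]
    simp only [h, dite_true]
    rw [hP _ hmid.1 hmid.2]
    simp only [decide_eq_true_eq]
    by_cases hB : PySem.Int.floordiv (low + high) 2 ≤ B
    · rw [if_pos hB]
      have IH := bsLoop_eq n k B (PySem.Int.floordiv (low + high) 2 + 1) high
        (PySem.Int.floordiv (low + high) 2)
        (fun d h1 h2 => hP d (by omega) h2)
      rw [IH]
      omega
    · rw [if_neg hB]
      have IH := bsLoop_eq n k B low (PySem.Int.floordiv (low + high) 2 - 1) best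
        (fun d h1 h2 => hP d h1 (by omega))
      rw [IH]
      omega
  · rw [bsLoop]
    simp only [h, dite_false]
    have hlt : high < low := by omega
    rw [if_pos hlt]
termination_by (high + 1 - low).toNat
decreasing_by
  · omega
  · omega

theorem solve_eq_alt (n k : Int) : solve n k = solve_alt n k := by
  unfold solve solve_alt
  by_cases hn : n < 1
  · rw [bsLoop]
    have h1 : ¬ ((1:Int) ≤ n) := by omega
    simp [h1, hn]
  · have hn1 : (1:Int) ≤ n := by omega
    rw [bsLoop_eq n k (if k ≤ 1 then n else PySem.Int.floordiv (n - 1) (k - 1)) 1 n 0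
      (fun d h1 h2 => place_eq n k d hn1 h1 h2)]
    by_cases hk : k ≤ 1
    · simp only [hk, if_pos, if_neg hn]
      exact min_self n
    · simp only [hk, if_neg, not_false_eq_true, if_neg hn]
      have hpos : (0:Int) < k - 1 := by omega
      have hB0 : 0 ≤ PySem.Int.floordiv (n - 1) (k - 1) := by
        rw [PySem.Int.le_floordiv_iff_mul_le hpos]
        have : (0:Int) * (k - 1) = 0 := by ring
        omega
      have hBn : PySem.Int.floordiv (n - 1) (k - 1) < n := by
        rw [PySem.Int.floordiv_lt_iff_lt_mul hpos]
        nlinarith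
      omega

-- ===== VERDICT (by name: the statement is the Claim_ definition above) =====
theorem solve_spec : Claim_equal_solve := by
  intro n k _
  show solve n k = solve_alt n k
  exact solve_eq_alt n k
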